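-- pv_equiv track=rewrite | github.com/IPutMilkInTea/HOGENT2024-2025 | Sem01/CCSA/H00/DodonaOEF/H4_functies/bovensteboven.py | bovensteboven
-- ===== SOURCE A (Python) =====
-- def bovensteboven(n):
--     draai_mapping = {'0': '0', '1': '1', '6': '9', '8': '8', '9': '6'}
--     n_str = str(n)
--     gedraaide_str = ''
--
--     for char in n_str:
--         if char not in draai_mapping:
--             return False
--         gedraaide_str = draai_mapping[char] + gedraaide_str
--     return n_str == gedraaide_str
-- ===== SOURCE B (Python) =====
-- def bovensteboven(n):
--     draai_mapping = {'0': '0', '1': '1', '6': '9', '8': '8', '9': '6'}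
--     s = str(n)
--     for a, b in zip(s, reversed(s)):
--         if b not in draai_mapping or draai_mapping[b] != a:
--             return False
--     return True
-- ===== Notes on version B (the rewrite author's own statement) =====
-- stated objective: simpler
-- what changed: B drops A's accumulator that materializes the rotated string and instead pairs the string with its reverse, checking each end-to-end pair (validity + rotation match) in one zip pass with early exit.
import Mathlib
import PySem

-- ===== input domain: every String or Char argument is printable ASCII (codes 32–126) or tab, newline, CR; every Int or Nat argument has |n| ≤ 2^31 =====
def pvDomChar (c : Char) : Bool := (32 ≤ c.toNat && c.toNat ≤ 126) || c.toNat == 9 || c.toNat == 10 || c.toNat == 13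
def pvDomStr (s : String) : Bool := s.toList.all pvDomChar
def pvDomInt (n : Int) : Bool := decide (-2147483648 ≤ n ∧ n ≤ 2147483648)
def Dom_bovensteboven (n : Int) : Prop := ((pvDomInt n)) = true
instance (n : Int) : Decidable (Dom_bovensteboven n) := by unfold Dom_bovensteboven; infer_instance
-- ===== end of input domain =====

-- B replaces A's rotated-string accumulator by a single zip of the string with its
-- reverse, checking each end-to-end pair in place (objective: simpler).

-- ===== PORT A =====
-- the dict lookup draai_mapping.get(char): none = char not in draai_mapping
def draaiA (c : Char) : Option Char :=
  if c = '0' then some '0' else if c = '1' then some '1' else if c = '6' then some '9'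
  else if c = '8' then some '8' else if c = '9' then some '6' else none

-- the for-loop: builds gedraaide_str (front-prepend), early-returns none on invalid char
def aLoop (s : List Char) (acc : List Char) : Option (List Char) :=
  match s with
  | [] => some acc
  | c :: t =>
    match draaiA c with
    | none => none
    | some d => aLoop t (d :: acc)

def bovensteboven (n : Int) : Bool :=
  let s := (PySem.Int.toStr n).toList
  match aLoop s [] with
  | none => false
  | some g => s == g

-- ===== PORT B =====
def draaiB (c : Char) : Option Char :=
  if c = '0' then some '0' else if c = '1' then some '1' else if c = '6' then some '9'
  else if c = '8' then some '8' else if c = '9' then some '6' else none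

def bovensteboven_alt (n : Int) : Bool :=
  let s := (PySem.Int.toStr n).toList
  (s.zip s.reverse).all fun p =>
    match draaiB p.2 with
    | none => false
    | some d => d == p.1

-- ===== PRECONDITION & SPEC =====
def Spec_bovensteboven (n : Int) (out : Bool) : Prop := out = bovensteboven_alt n
instance (n : Int) (out : Bool) : Decidable (Spec_bovensteboven n out) := by unfold Spec_bovensteboven; infer_instance

-- ===== CLAIM (what is proved, stated in full; the proofs are below) =====
def Claim_equal_bovensteboven : Prop := ∀ (n : Int), Dom_bovensteboven n → Spec_bovensteboven n (bovensteboven n)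

-- ===== LEMMAS AND PROOFS =====
def validC (c : Char) : Bool := (draaiA c).isSome
def dmapC (c : Char) : Char := (draaiA c).getD 'x'

theorem draaiA_eq_valid (c : Char) :
    draaiA c = if validC c then some (dmapC c) else none := by
  unfold validC dmapC
  cases h : draaiA c <;> simp

theorem aLoop_eq (s : List Char) (acc : List Char) :
    aLoop s acc = if s.all validC then some ((s.map dmapC).reverse ++ acc) else none := by
  induction s generalizing acc with
  | nil => simp [aLoop]
  | cons c t ih =>
    simp only [aLoop, draaiA_eq_valid c, List.all_cons]
    by_cases hv : validC c = true
    · simp [hv, ih, List.append_assoc]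
    · simp [hv]

theorem A_iff (s : List Char) :
    (match aLoop s [] with | none => false | some g => s == g) = true ↔
      ((∀ c ∈ s, validC c = true) ∧
       ∀ i : Nat, (h : i < s.length) → s[i] = dmapC (s[s.length - 1 - i]'(by omega))) := by
  rw [aLoop_eq]
  by_cases hv : s.all validC = true
  · have hlen : (s.map dmapC).reverse.length = s.length := by simp
    simp only [hv, if_pos, List.append_nil, beq_iff_eq]
    constructor
    · intro he
      refine ⟨by simpa [List.all_eq_true] using hv, ?_⟩
      intro i h
      have := List.getElem_of_eq he h
      simpa [List.getElem_reverse, List.getElem_map] using this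
    · rintro ⟨_, hpt⟩
      refine List.ext_getElem (by simp) ?_
      intro i h1 h2
      rw [List.getElem_reverse, List.getElem_map]
      simp only [List.length_map]
      exact hpt i h1
  · simp only [hv, Bool.false_eq_true]
    constructor
    · intro h; exact absurd h (by simp)
    · rintro ⟨hall, _⟩
      exact absurd (by simpa [List.all_eq_true] using hall) hv

theorem B_iff (s : List Char) :
    ((s.zip s.reverse).all fun p =>
        match draaiB p.2 with | none => false | some d => d == p.1) = true ↔
      ∀ i : Nat, (h : i < s.length) →
        validC (s[s.length - 1 - i]'(by omega)) = true ∧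
        dmapC (s[s.length - 1 - i]'(by omega)) = s[i] := by
  have hdb : draaiB = draaiA := rfl
  rw [List.all_eq_true]
  constructor
  · intro hall i h
    have hz : i < (s.zip s.reverse).length := by simp [List.length_zip]; omega
    have hm := hall (s.zip s.reverse)[i] (List.getElem_mem hz)
    rw [List.getElem_zip, List.getElem_reverse] at hm
    simp only [hdb, draaiA_eq_valid] at hm
    by_cases hv : validC (s[s.length - 1 - i]'(by omega)) = true
    · simp only [hv, if_pos] at hm
      exact ⟨hv, by simpa [beq_iff_eq] using hm⟩
    · simp [hv] at hm
  · intro hpt p hp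
    obtain ⟨i, hz, rfl⟩ := List.mem_iff_getElem.mp hp
    have hi : i < s.length := by simp [List.length_zip] at hz; omega
    rw [List.getElem_zip, List.getElem_reverse]
    obtain ⟨h1, h2⟩ := hpt i hi
    simp [hdb, draaiA_eq_valid, h1, h2]

theorem main_eq (s : List Char) :
    (match aLoop s [] with | none => false | some g => s == g) =
    ((s.zip s.reverse).all fun p =>
        match draaiB p.2 with | none => false | some d => d == p.1) := by
  rw [Bool.eq_iff_iff, A_iff, B_iff]
  constructor
  · rintro ⟨hall, hpt⟩ i h
    refine ⟨hall _ (List.getElem_mem (by omega)), ?_⟩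
    exact (hpt i h).symm
  · intro hpt
    constructor
    · intro c hc
      obtain ⟨k, hk, rfl⟩ := List.mem_iff_getElem.mp hc
      have h : s.length - 1 - k < s.length := by omega
      have := (hpt (s.length - 1 - k) h).1
      have hkk : s.length - 1 - (s.length - 1 - k) = k := by omega
      simpa [hkk] using this
    · intro i h
      exact ((hpt i h).2).symm

-- ===== VERDICT (by name: the statement is the Claim_ definition above) =====
theorem bovensteboven_spec : Claim_equal_bovensteboven := by
  intro n _
  unfold Spec_bovensteboven bovensteboven bovensteboven_alt
  exact main_eq _
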